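-- pv_equiv track=rewrite | github.com/Anusha1A/python_functions | distinct.py | solve
-- ===== SOURCE A (Python) =====
-- def solve(s, k):
--    i = 0
--    ret = []
--    mp, to_print = {}, ""
--    while i < len(s):
--       if i % k == 0 and i != 0:
--          ret.append(to_print)
--          mp, to_print = {}, ""
--       if s[i] not in mp.keys():
--          mp[s[i]] = 0
--          to_print += s[i]
--       i += 1
--    ret.append(to_print)
--    return ret
-- ===== SOURCE B (Python) =====
-- def solve(s, k):
--     chunks = []
--     while len(s) > k:
--         chunks.append("".join(dict.fromkeys(s[:k])))
--         s = s[k:]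
--     chunks.append("".join(dict.fromkeys(s)))
--     return chunks
-- ===== Notes on version B (the rewrite author's own statement) =====
-- stated objective: simpler
-- what changed: A's per-character index walk with a dict/string/flush state machine keyed on i % k is replaced by a whole-chunk loop that repeatedly slices off the k-character prefix and deduplicates it with dict.fromkeys; Pre_ excludes k <= 0, where A raises ZeroDivisionError (k = 0 with nonempty s) or flushes at multiples of |k| only by a modulo-sign accident (k < 0), while B's prefix-consuming loop does not terminate on nonempty s (and on empty s with k < 0).
-- outside the precondition, e.g. on solve('abcd', -2): A returns ['ab', 'cd'], B does not finish within the time limit; on solve('', -1): A returns [''], B does not finish within the time limit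
import Mathlib
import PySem

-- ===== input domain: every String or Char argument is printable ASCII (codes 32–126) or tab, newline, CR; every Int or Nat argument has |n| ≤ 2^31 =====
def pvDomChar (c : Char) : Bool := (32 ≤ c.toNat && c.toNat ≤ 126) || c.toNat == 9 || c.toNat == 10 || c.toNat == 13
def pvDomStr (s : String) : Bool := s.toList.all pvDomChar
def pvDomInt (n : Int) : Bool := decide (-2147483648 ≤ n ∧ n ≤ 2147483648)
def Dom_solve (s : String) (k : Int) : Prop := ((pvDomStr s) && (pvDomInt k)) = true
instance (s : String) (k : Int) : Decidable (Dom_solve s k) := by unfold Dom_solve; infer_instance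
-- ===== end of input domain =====

-- B replaces A's per-character index walk with dict/string/flush state keyed on i % k by a
-- loop that repeatedly slices off the k-character prefix and deduplicates it wholesale (simpler decomposition, not faster).


-- ===== PORT A =====
-- A's while loop: state (i, mp, to_print, ret); to_print is carried as List Char and turned
-- into a String exactly where A appends it to ret
def solveLoopA (k : Int) : List Char → Int → PySem.Dict Char Int → List Char → List String → List String
  | [], _, _, tp, ret => ret ++ [String.ofList tp]
  | c :: rest, i, mp, tp, ret =>
    match (if PySem.Int.mod i k = 0 ∧ i ≠ 0
           then (ret ++ [String.ofList tp], (PySem.Dict.empty : PySem.Dict Char Int), ([] : List Char))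
           else (ret, mp, tp)) with
    | (ret', mp', tp') =>
      if c ∈ PySem.Dict.keys mp' then
        solveLoopA k rest (i + 1) mp' tp' ret'
      else
        solveLoopA k rest (i + 1) (PySem.Dict.insert mp' c 0) (tp' ++ [c]) ret'

def solve (s : String) (k : Int) : List String :=
  solveLoopA k s.toList 0 PySem.Dict.empty [] []

-- ===== PORT B =====
-- B's while loop over the shrinking string; the fuel argument only makes the recursion total
-- in Lean: for k ≥ 1 (all of Pre_) it never runs out, and for k ≤ 0 the Python B diverges.
def solveLoopB (k : Int) : Nat → List Char → List String → List String
  | 0, _, chunks => chunks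
  | fuel + 1, cs, chunks =>
    if k < (cs.length : Int) then
      solveLoopB k fuel (PySem.List.slice cs (some k) none)
        (chunks ++ [String.ofList (PySem.List.dedup (PySem.List.slice cs none (some k)))])
    else
      chunks ++ [String.ofList (PySem.List.dedup cs)]

def solve_alt (s : String) (k : Int) : List String :=
  solveLoopB k (s.toList.length + 1) s.toList []

-- ===== PRECONDITION & SPEC =====
-- Pre_ excludes k ≤ 0: for k = 0 A raises ZeroDivisionError on nonempty s, and for k < 0 A's
-- modulo flush chunks at multiples of |k| only by a sign accident; B's prefix-consuming loop
-- does not terminate there on nonempty s (and on empty s with k < 0).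
def Pre_solve (s : String) (k : Int) : Prop := 1 ≤ k
instance (s : String) (k : Int) : Decidable (Pre_solve s k) := by unfold Pre_solve; infer_instance
def pvWitness_solve : String × Int := ("abca", 2)

def Spec_solve (s : String) (k : Int) (out : List String) : Prop := out = solve_alt s k
instance (s : String) (k : Int) (out : List String) : Decidable (Spec_solve s k out) := by unfold Spec_solve; infer_instance

-- ===== CLAIM (what is proved, stated in full; the proofs are below) =====
def Claim_equal_solve : Prop := ∀ (s : String) (k : Int), Dom_solve s k → Pre_solve s k → Spec_solve s k (solve s k)

-- ===== LEMMAS AND PROOFS =====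

-- common chunk-level description of both programs: the current chunk has `r` free slots and
-- already collected the distinct characters `tp`; later chunks are fresh (tp = [], r = size)
def chunkRun (size : Nat) (tp : List Char) (r : Nat) (cs : List Char) : List String :=
  if cs.length ≤ r ∨ size = 0 ∨ r = 0 then
    [String.ofList (cs.foldl PySem.Set.add tp)]
  else
    String.ofList ((cs.take r).foldl PySem.Set.add tp) :: chunkRun size [] size (cs.drop r)
termination_by cs.length
decreasing_by simp_all; omega

theorem chunkRun_nil (size : Nat) (tp : List Char) (r : Nat) :
    chunkRun size tp r [] = [String.ofList tp] := by
  rw [chunkRun]; simp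

-- consuming one character of the current chunk
theorem chunkRun_cons (size : Nat) (tp : List Char) (r : Nat) (c : Char) (rest : List Char)
    (hr : 1 ≤ r) (hrs : r ≤ size) :
    chunkRun size tp r (c :: rest) =
      if rest ≠ [] ∧ r = 1 then
        String.ofList (PySem.Set.add tp c) :: chunkRun size [] size rest
      else
        chunkRun size (PySem.Set.add tp c) (r - 1) rest := by
  rcases rest with _ | ⟨d, rest⟩
  · simp only [ne_eq, not_true_eq_false, false_and, if_false, chunkRun_nil]
    rw [chunkRun]
    have : ([c] : List Char).length ≤ r ∨ size = 0 ∨ r = 0 := by simp; omega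
    simp only [this, if_true, List.foldl]
  · by_cases h1 : r = 1
    · subst h1
      simp only [ne_eq, reduceCtorEq, not_false_iff, and_true, if_true]
      rw [chunkRun]
      have hc : ¬ ((c :: d :: rest).length ≤ 1 ∨ size = 0 ∨ (1:Nat) = 0) := by simp; omega
      simp only [hc, if_false, List.take, List.drop, List.foldl]
    · have h2 : 2 ≤ r := by omega
      simp only [h1, and_false, if_false]
      conv_lhs => rw [chunkRun]
      conv_rhs => rw [chunkRun]
      have hiff : ((d :: rest).length ≤ r - 1 ∨ size = 0 ∨ r - 1 = 0) ↔
             ((c :: d :: rest).length ≤ r ∨ size = 0 ∨ r = 0) := by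
        simp; omega
      by_cases hb : (c :: d :: rest).length ≤ r ∨ size = 0 ∨ r = 0
      · simp only [hb, if_true, hiff.2 hb, List.foldl]
      · simp only [hb, if_false, (not_iff_not.mpr hiff).2 hb]
        have htake : (c :: d :: rest).take r = c :: (d :: rest).take (r - 1) := by
          rcases r with _ | r
          · omega
          · simp
        have hdrop : (c :: d :: rest).drop r = (d :: rest).drop (r - 1) := by
          rcases r with _ | r
          · omega
          · simp
        rw [htake, hdrop]
        simp only [List.foldl]

-- A's flush test `i % k == 0` is divisibility by |k|
theorem modAbs (k : Int) (j : Nat) :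
    (PySem.Int.mod (j : Int) k = 0) ↔ j % k.natAbs = 0 := by
  rw [PySem.Int.mod_eq_zero_iff_dvd, ← Int.natAbs_dvd, Int.natCast_dvd_natCast,
    Nat.dvd_iff_mod_eq_zero]

-- the main invariant of A's loop
theorem loopA_eq (k : Int) (hk : k ≠ 0) (cs : List Char) :
    ∀ (j : Nat) (mp : PySem.Dict Char Int) (tp : List Char) (ret : List String),
    (∀ c, c ∈ PySem.Dict.keys mp ↔ c ∈ tp) →
    solveLoopA k cs (j : Int) mp tp ret =
      if cs ≠ [] ∧ j % k.natAbs = 0 ∧ j ≠ 0 then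
        (ret ++ [String.ofList tp]) ++ chunkRun k.natAbs [] k.natAbs cs
      else
        ret ++ chunkRun k.natAbs tp (k.natAbs - j % k.natAbs) cs := by
  induction cs with
  | nil =>
    intro j mp tp ret _
    simp [solveLoopA, chunkRun_nil]
  | cons c rest ih =>
    intro j mp tp ret hmp
    have hsz : 1 ≤ k.natAbs := Nat.one_le_iff_ne_zero.mpr (Int.natAbs_ne_zero.mpr hk)
    set size := k.natAbs with hsizedef
    have hmlt : j % size < size := Nat.mod_lt _ (by omega)
    set m := j % size with hmdef
    set r := size - m with hrdef
    have hr1 : 1 ≤ r := by omega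
    have hrs : r ≤ size := by omega
    have hsucc : (j + 1) % size = if m + 1 = size then 0 else m + 1 := by
      have hdm := Nat.div_add_mod j size
      have hj1 : j + 1 = (m + 1) + size * (j / size) := by omega
      rw [hj1, Nat.add_mul_mod_self_left]
      by_cases h : m + 1 = size
      · simp [h, Nat.mod_self]
      · rw [Nat.mod_eq_of_lt (by omega)]
        simp [h]
    -- one character step: common to the flush and non-flush branch
    have key : ∀ (mp' : PySem.Dict Char Int) (tp' : List Char) (ret' : List String),
        (∀ x, x ∈ PySem.Dict.keys mp' ↔ x ∈ tp') →
        (if c ∈ PySem.Dict.keys mp' then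
           solveLoopA k rest ((j : Int) + 1) mp' tp' ret'
         else
           solveLoopA k rest ((j : Int) + 1) (PySem.Dict.insert mp' c 0) (tp' ++ [c]) ret') =
        ret' ++ chunkRun size tp' r (c :: rest) := by
      intro mp' tp' ret' hmp'
      have hcast : ((j : Int) + 1) = ((j + 1 : Nat) : Int) := by push_cast; ring
      have hfin : ∀ (mp'' : PySem.Dict Char Int),
          (∀ x, x ∈ PySem.Dict.keys mp'' ↔ x ∈ PySem.Set.add tp' c) →
          solveLoopA k rest ((j + 1 : Nat) : Int) mp'' (PySem.Set.add tp' c) ret' =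
          ret' ++ chunkRun size tp' r (c :: rest) := by
        intro mp'' hmp''
        rw [ih (j + 1) mp'' (PySem.Set.add tp' c) ret' hmp'']
        rw [chunkRun_cons size tp' r c rest hr1 hrs]
        by_cases hrest : rest = []
        · subst hrest
          simp only [ne_eq, not_true_eq_false, false_and, if_false, chunkRun_nil]
        · by_cases hlast : r = 1
          · have hm1 : m + 1 = size := by omega
            rw [hsucc]
            simp only [hm1, if_true]
            simp [hrest, hlast]
          · have hm1 : ¬ (m + 1 = size) := by omega
            rw [hsucc]
            simp only [hm1, if_false]
            have hne : ¬ (m + 1 = 0) := by omega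
            have hrr : size - (m + 1) = r - 1 := by omega
            simp [hrest, hlast, hrr]
      by_cases hc : c ∈ tp'
      · rw [if_pos ((hmp' c).mpr hc), hcast]
        have h := hfin mp' (by
          intro x
          rw [PySem.Set.add_of_mem hc]
          exact hmp' x)
        rwa [PySem.Set.add_of_mem hc] at h
      · rw [if_neg (fun h => hc ((hmp' c).mp h)), hcast, ← PySem.Set.add_of_not_mem hc]
        exact hfin _ (by
          intro x
          rw [PySem.Dict.mem_keys_insert, PySem.Set.add_eq_ite, if_neg hc]
          simp [hmp' x, or_comm])
    -- unfold one iteration of A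
    by_cases hfl : m = 0 ∧ j ≠ 0
    · have hmod : PySem.Int.mod (j : Int) k = 0 := (modAbs k j).mpr hfl.1
      have hjz : ((j : Nat) : Int) ≠ 0 := Int.natCast_ne_zero.mpr hfl.2
      have hru : r = size := by omega
      rw [solveLoopA, if_pos ⟨hmod, hjz⟩]
      show (if c ∈ PySem.Dict.keys (PySem.Dict.empty : PySem.Dict Char Int) then
              solveLoopA k rest ((j : Int) + 1) PySem.Dict.empty [] (ret ++ [String.ofList tp])
            else
              solveLoopA k rest ((j : Int) + 1) (PySem.Dict.insert PySem.Dict.empty c 0)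
                ([] ++ [c]) (ret ++ [String.ofList tp])) = _
      rw [key PySem.Dict.empty [] (ret ++ [String.ofList tp])
        (by intro x; simp [PySem.Dict.keys_empty])]
      rw [if_pos (show (c :: rest) ≠ [] ∧ m = 0 ∧ j ≠ 0 from ⟨by simp, hfl.1, hfl.2⟩), hru]
    · have hcond : ¬ (PySem.Int.mod (j : Int) k = 0 ∧ ((j : Nat) : Int) ≠ 0) := by
        intro ⟨h1, h2⟩
        exact hfl ⟨(modAbs k j).mp h1, fun hj => h2 (by simp [hj])⟩
      rw [solveLoopA, if_neg hcond]
      show (if c ∈ PySem.Dict.keys mp then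
              solveLoopA k rest ((j : Int) + 1) mp tp ret
            else
              solveLoopA k rest ((j : Int) + 1) (PySem.Dict.insert mp c 0) (tp ++ [c]) ret) = _
      rw [key mp tp ret hmp]
      rw [if_neg (by
        intro ⟨_, h2, h3⟩
        exact hfl ⟨h2, h3⟩)]

-- B's prefix-consuming loop equals the chunk-level description (fuel never runs out for k ≥ 1)
theorem loopB_eq (k : Int) (hk : 1 ≤ k) :
    ∀ (fuel : Nat) (cs : List Char) (chunks : List String), cs.length < fuel →
    solveLoopB k fuel cs chunks = chunks ++ chunkRun k.toNat [] k.toNat cs := by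
  intro fuel
  induction fuel with
  | zero => intro cs chunks h; omega
  | succ fuel ih =>
    intro cs chunks hlen
    have hsz : 1 ≤ k.toNat := by omega
    have hkc : ((k.toNat : Nat) : Int) = k := Int.toNat_of_nonneg (by omega)
    rw [solveLoopB]
    by_cases h : k < (cs.length : Int)
    · rw [if_pos h]
      have hlt : k.toNat < cs.length := by omega
      have hs1 : PySem.List.slice cs (some k) none = cs.drop k.toNat := by
        rw [← hkc]; exact PySem.List.slice_from_natCast ..
      have hs2 : PySem.List.slice cs none (some k) = cs.take k.toNat := by
        rw [← hkc]; exact PySem.List.slice_to_natCast ..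
      rw [hs1, hs2, ih (cs.drop k.toNat) _ (by simp; omega)]
      conv_rhs => rw [chunkRun]
      rw [if_neg (by push Not; exact ⟨by omega, by omega, by omega⟩)]
      simp only [List.append_assoc, List.singleton_append]
      rfl
    · have hle : cs.length ≤ k.toNat := by omega
      rw [if_neg h, chunkRun, if_pos (Or.inl hle)]
      rfl

-- ===== VERDICT (by name: the statement is the Claim_ definition above) =====
theorem solve_spec : Claim_equal_solve := by
  intro s k _ hk
  have hk1 : (1 : Int) ≤ k := hk
  unfold Spec_solve solve solve_alt
  rw [loopB_eq k hk1 (s.toList.length + 1) s.toList [] (by omega)]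
  have hk0 : k ≠ 0 := by omega
  have h := loopA_eq k hk0 s.toList 0 PySem.Dict.empty [] []
    (by intro c; simp [PySem.Dict.keys_empty])
  simp only [Nat.cast_zero, ne_eq, not_true_eq_false, and_false, if_false, Nat.zero_mod,
    Nat.sub_zero, List.nil_append] at h
  rw [h]
  have habs : k.natAbs = k.toNat := by omega
  rw [habs, List.nil_append]
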